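-- pv_equiv track=rewrite | github.com/tondeni/AI_Agent-FSC_Developer | code/generators/strategy_generator.py | _parse_strategies
-- ===== SOURCE A (Python) =====
-- from typing import List, Dict, Optional, Callable
--
-- def _parse_strategies(response: str) -> Dict[str, str]:
--     """
--     Parse strategies from LLM response.
--
--     Args:
--         response: LLM response text
--
--     Returns:
--         Dictionary mapping strategy type to strategy text
--     """
--     strategies = {}
--     lines = response.split('\n')
--
--     current_strategy_type = None
--     current_content = []
--
--     strategy_markers = {
--         'a) fault avoidance': 'fault_avoidance',
--         'b) fault detection': 'fault_detection',
--         'c) fault control': 'fault_control',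
--         'd) safe state transition': 'safe_state_transition',
--         'e) fault tolerance': 'fault_tolerance',
--         'f) degradation': 'degradation',
--         'g) driver warning strategy - exposure': 'warning_exposure',
--         'h) driver warning strategy - controllability': 'warning_controllability',
--         'i) timing requirements': 'timing',
--         'j) arbitration': 'arbitration'
--     }
--
--     for line in lines:
--         line_lower = line.strip().lower()
--
--         # Check if this line starts a new strategy section
--         matched = False
--         for marker, strategy_key in strategy_markers.items():
--             if line_lower.startswith('###') and marker in line_lower:
--                 # Save previous strategy
--                 if current_strategy_type and current_content:
--                     strategies[current_strategy_type] = '\n'.join(current_content).strip()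
--
--                 # Start new strategy
--                 current_strategy_type = strategy_key
--                 current_content = []
--                 matched = True
--                 break
--
--         if not matched and current_strategy_type:
--             # Add content to current strategy
--             if line.strip() and not line.strip().startswith('###'):
--                 current_content.append(line)
--
--     # Save last strategy
--     if current_strategy_type and current_content:
--         strategies[current_strategy_type] = '\n'.join(current_content).strip()
--
--     # Ensure all required strategies are present (add placeholders if missing)
--     required_strategies = [
--         'fault_avoidance', 'fault_detection', 'fault_control',
--         'safe_state_transition', 'fault_tolerance', 'degradation',
--         'warning_exposure', 'warning_controllability', 'timing', 'arbitration'
--     ]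
--
--     for req in required_strategies:
--         if req not in strategies:
--             strategies[req] = 'To be specified'
--
--     return strategies
-- ===== SOURCE B (Python) =====
-- # B: cursor-based scanner with a header-key helper and nested while loops (alternative decomposition; same result as A).
-- _MARKERS = {
--     'a) fault avoidance': 'fault_avoidance',
--     'b) fault detection': 'fault_detection',
--     'c) fault control': 'fault_control',
--     'd) safe state transition': 'safe_state_transition',
--     'e) fault tolerance': 'fault_tolerance',
--     'f) degradation': 'degradation',
--     'g) driver warning strategy - exposure': 'warning_exposure',
--     'h) driver warning strategy - controllability': 'warning_controllability',
--     'i) timing requirements': 'timing',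
--     'j) arbitration': 'arbitration'
-- }
--
-- _REQUIRED = [
--     'fault_avoidance', 'fault_detection', 'fault_control',
--     'safe_state_transition', 'fault_tolerance', 'degradation',
--     'warning_exposure', 'warning_controllability', 'timing', 'arbitration'
-- ]
--
--
-- def _header_key(line):
--     low = line.strip().lower()
--     if not low.startswith('###'):
--         return None
--     for marker, key in _MARKERS.items():
--         if marker in low:
--             return key
--     return None
--
--
-- def _parse_strategies(response):
--     lines = response.split('\n')
--     n = len(lines)
--     strategies = {}
--     i = 0
--     while i < n:
--         key = _header_key(lines[i])
--         i += 1
--         if key is None: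
--             continue
--         seg = []
--         while i < n and _header_key(lines[i]) is None:
--             s = lines[i].strip()
--             if s and not s.startswith('###'):
--                 seg.append(lines[i])
--             i += 1
--         if seg:
--             strategies[key] = '\n'.join(seg).strip()
--     for req in _REQUIRED:
--         strategies.setdefault(req, 'To be specified')
--     return strategies
-- ===== Notes on version B (the rewrite author's own statement) =====
-- stated objective: alternative
-- what changed: A's single stateful pass (current-key/accumulated-content state machine with a matched flag and an inner marker loop inlined in the scan) is replaced by a cursor-based scanner: a _header_key helper classifies a line once, and nested while loops jump from header to header, collecting each section's kept lines in one inner loop before storing it.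
import Mathlib
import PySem

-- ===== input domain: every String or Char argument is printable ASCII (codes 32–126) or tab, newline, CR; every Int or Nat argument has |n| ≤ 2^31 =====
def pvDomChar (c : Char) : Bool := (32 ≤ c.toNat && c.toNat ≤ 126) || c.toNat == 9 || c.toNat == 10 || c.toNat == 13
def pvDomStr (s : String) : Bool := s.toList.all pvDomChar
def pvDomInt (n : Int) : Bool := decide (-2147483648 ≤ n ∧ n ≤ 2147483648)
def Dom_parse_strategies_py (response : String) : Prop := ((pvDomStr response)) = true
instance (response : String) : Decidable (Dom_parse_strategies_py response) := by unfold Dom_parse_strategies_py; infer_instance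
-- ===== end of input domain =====

-- B replaces A's one-pass state machine (current key + accumulated content + matched flag) by a cursor
-- scanner: a header-key helper plus nested while loops that collect each segment in one go (alternative
-- decomposition, same cost and the same return value).

-- ===== PORT A =====
-- shared literal tables (the same dict/list literals appear verbatim in both Pythons)
def markersList : List (String × String) :=
  [("a) fault avoidance", "fault_avoidance"),
   ("b) fault detection", "fault_detection"),
   ("c) fault control", "fault_control"),
   ("d) safe state transition", "safe_state_transition"),
   ("e) fault tolerance", "fault_tolerance"),
   ("f) degradation", "degradation"),
   ("g) driver warning strategy - exposure", "warning_exposure"),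
   ("h) driver warning strategy - controllability", "warning_controllability"),
   ("i) timing requirements", "timing"),
   ("j) arbitration", "arbitration")]

def requiredList : List String :=
  ["fault_avoidance", "fault_detection", "fault_control",
   "safe_state_transition", "fault_tolerance", "degradation",
   "warning_exposure", "warning_controllability", "timing", "arbitration"]

-- A's "save current strategy" code (it appears twice in A: inside the loop and after it)
def finalizeA (st : PySem.Dict String String × Option String × List String) : PySem.Dict String String :=
  match st.2.1 with
  | some t => if st.2.2 ≠ [] then st.1.insert t (PySem.Str.strip (PySem.Str.join "\n" st.2.2)) else st.1
  | none => st.1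

-- A's loop body; the inner for-over-markers with break is the first match in dict order (find?);
-- line_lower = lower(strip(line)) is written out inline
def stepA (st : PySem.Dict String String × Option String × List String) (line : String) :
    PySem.Dict String String × Option String × List String :=
  match markersList.find? (fun p =>
      PySem.Str.startswith (PySem.Str.lower (PySem.Str.strip line)) "###" &&
      PySem.Str.isIn p.1 (PySem.Str.lower (PySem.Str.strip line))) with
  | some p => (finalizeA st, some p.2, [])
  | none =>
    match st.2.1 with
    | some _ =>
      if (PySem.Str.strip line != "") && !(PySem.Str.startswith (PySem.Str.strip line) "###") then
        (st.1, st.2.1, st.2.2 ++ [line])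
      else st
    | none => st

-- response.split('\n'): the separator is the non-empty literal "\n", so split? is always `some`
def parse_strategies_py (response : String) : List (String × String) :=
  (requiredList.foldl
    (fun d req => if d.contains req = false then d.insert req "To be specified" else d)
    (finalizeA (((PySem.Str.split? response "\n").getD []).foldl stepA
      (PySem.Dict.empty, none, [])))).items

-- ===== PORT B =====
def headerKey (line : String) : Option String :=
  if PySem.Str.startswith (PySem.Str.lower (PySem.Str.strip line)) "###" = false then none
  else
    match markersList.find? (fun p =>
        PySem.Str.isIn p.1 (PySem.Str.lower (PySem.Str.strip line))) with
    | some p => some p.2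
    | none => none

-- inner while: collect one segment's kept lines, return (seg, new cursor position);
-- `fuel` is a pure totality guard (one unit per iteration; lines.length is always enough)
def segLoopB (lines : List String) : Nat → Nat → List String → List String × Nat
  | 0, i, seg => (seg, i)
  | fuel + 1, i, seg =>
    if h : i < lines.length then
      if headerKey lines[i] = none then
        segLoopB lines fuel (i + 1)
          (if (PySem.Str.strip lines[i] != "") && !(PySem.Str.startswith (PySem.Str.strip lines[i]) "###") then
            seg ++ [lines[i]] else seg)
      else (seg, i)
    else (seg, i)

-- outer while over the cursor i, same fuel discipline
def outerLoopB (lines : List String) : Nat → Nat → PySem.Dict String String → PySem.Dict String String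
  | 0, _, d => d
  | fuel + 1, i, d =>
    if h : i < lines.length then
      match headerKey lines[i] with
      | none => outerLoopB lines fuel (i + 1) d
      | some k =>
        outerLoopB lines fuel (segLoopB lines lines.length (i + 1) []).2
          (if (segLoopB lines lines.length (i + 1) []).1 ≠ [] then
            d.insert k (PySem.Str.strip (PySem.Str.join "\n" (segLoopB lines lines.length (i + 1) []).1))
          else d)
    else d

-- response.split('\n') as in port A
def parse_strategies_py_alt (response : String) : List (String × String) :=
  ((requiredList.foldl (fun d req => d.setdefault req "To be specified")
    (outerLoopB ((PySem.Str.split? response "\n").getD [])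
      ((PySem.Str.split? response "\n").getD []).length 0 PySem.Dict.empty))).items

-- ===== PRECONDITION & SPEC =====
def Spec_parse_strategies_py (response : String) (out : List (String × String)) : Prop := out = parse_strategies_py_alt response
instance (response : String) (out : List (String × String)) : Decidable (Spec_parse_strategies_py response out) := by unfold Spec_parse_strategies_py; infer_instance

-- ===== CLAIM (what is proved, stated in full; the proofs are below) =====
def Claim_equal_parse_strategies_py : Prop := ∀ (response : String), Dom_parse_strategies_py response → Spec_parse_strategies_py response (parse_strategies_py response)

-- ===== LEMMAS AND PROOFS =====

-- past the end, any fuel stops at once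
lemma seg_stop (lines : List String) (m i : Nat) (seg : List String) (h : lines.length ≤ i) :
    segLoopB lines m i seg = (seg, i) := by
  cases m with
  | zero => rfl
  | succ m => rw [segLoopB, dif_neg (by omega)]

-- the cursor never moves backwards
lemma seg_ge (lines : List String) : ∀ m i seg, i ≤ (segLoopB lines m i seg).2 := by
  intro m
  induction m with
  | zero => intro i seg; exact le_refl i
  | succ m ih =>
    intro i seg
    rw [segLoopB]
    by_cases hi : i < lines.length
    · rw [dif_pos hi]
      split
      · exact Nat.le_of_succ_le (ih (i + 1) _)
      · exact le_refl i
    · rw [dif_neg hi]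

-- fuel irrelevance for the inner loop
lemma seg_fuel (lines : List String) : ∀ m m' i seg, lines.length ≤ i + m → lines.length ≤ i + m' →
    segLoopB lines m i seg = segLoopB lines m' i seg := by
  intro m
  induction m with
  | zero => intro m' i seg h h'; rw [seg_stop lines 0 i seg (by omega), seg_stop lines m' i seg (by omega)]
  | succ m ih =>
    intro m' i seg h h'
    cases m' with
    | zero => rw [seg_stop lines (m + 1) i seg (by omega), seg_stop lines 0 i seg (by omega)]
    | succ m' =>
      by_cases hi : i < lines.length
      · rw [segLoopB, segLoopB, dif_pos hi, dif_pos hi]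
        by_cases hk : headerKey lines[i] = none
        · rw [if_pos hk, if_pos hk]
          exact ih m' (i + 1) _ (by omega) (by omega)
        · rw [if_neg hk, if_neg hk]
      · rw [seg_stop lines (m + 1) i seg (by omega), seg_stop lines (m' + 1) i seg (by omega)]

-- past the end, any fuel returns d at once
lemma outer_stop (lines : List String) (m i : Nat) (d : PySem.Dict String String)
    (h : lines.length ≤ i) : outerLoopB lines m i d = d := by
  cases m with
  | zero => rfl
  | succ m => rw [outerLoopB, dif_neg (by omega)]

-- fuel irrelevance for the outer loop
lemma outer_fuel (lines : List String) : ∀ m m' i d, lines.length ≤ i + m → lines.length ≤ i + m' →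
    outerLoopB lines m i d = outerLoopB lines m' i d := by
  intro m
  induction m with
  | zero => intro m' i d h h'; rw [outer_stop lines 0 i d (by omega), outer_stop lines m' i d (by omega)]
  | succ m ih =>
    intro m' i d h h'
    cases m' with
    | zero => rw [outer_stop lines (m + 1) i d (by omega), outer_stop lines 0 i d (by omega)]
    | succ m' =>
      by_cases hi : i < lines.length
      · rw [outerLoopB, outerLoopB, dif_pos hi, dif_pos hi]
        cases hk : headerKey lines[i] with
        | none => exact ih m' (i + 1) d (by omega) (by omega)
        | some k =>
          have hge := seg_ge lines lines.length (i + 1) []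
          exact ih m' _ _ (by omega) (by omega)
      · rw [outer_stop lines (m + 1) i d (by omega), outer_stop lines (m' + 1) i d (by omega)]

-- one unfolding of the inner loop at a non-header line (with the canonical fuel lines.length)
lemma seg_step (lines : List String) (i : Nat) (c : List String) (hi : i < lines.length)
    (hk : headerKey lines[i] = none) :
    segLoopB lines lines.length i c =
      segLoopB lines lines.length (i + 1)
        (if (PySem.Str.strip lines[i] != "") && !(PySem.Str.startswith (PySem.Str.strip lines[i]) "###") then
          c ++ [lines[i]] else c) := by
  obtain ⟨f, hf⟩ : ∃ f, lines.length - i = f + 1 := ⟨lines.length - i - 1, by omega⟩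
  rw [seg_fuel lines lines.length (lines.length - i) i c (by omega) (by omega), hf,
      segLoopB, dif_pos hi, if_pos hk]
  exact seg_fuel lines f lines.length (i + 1) _ (by omega) (by omega)

-- the inner loop stops at a header line
lemma seg_header (lines : List String) (i : Nat) (c : List String) (hi : i < lines.length)
    (hk : headerKey lines[i] ≠ none) :
    segLoopB lines lines.length i c = (c, i) := by
  obtain ⟨f, hf⟩ : ∃ f, lines.length - i = f + 1 := ⟨lines.length - i - 1, by omega⟩
  rw [seg_fuel lines lines.length (lines.length - i) i c (by omega) (by omega), hf,
      segLoopB, dif_pos hi, if_neg hk]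

-- A's loop body, expressed through B's header classifier
lemma stepA_eq (st : PySem.Dict String String × Option String × List String) (line : String) :
    stepA st line =
      match headerKey line with
      | some k => (finalizeA st, some k, [])
      | none =>
        match st.2.1 with
        | some _ =>
          if (PySem.Str.strip line != "") && !(PySem.Str.startswith (PySem.Str.strip line) "###") then
            (st.1, st.2.1, st.2.2 ++ [line])
          else st
        | none => st := by
  unfold stepA headerKey
  cases hsw : PySem.Str.startswith (PySem.Str.lower (PySem.Str.strip line)) "###" with
  | false =>
    simp only [Bool.false_and]
    rw [List.find?_eq_none.mpr (fun p _ => Bool.false_ne_true)]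
    rfl
  | true =>
    simp only [Bool.true_and]
    cases hf : markersList.find? (fun p =>
        PySem.Str.isIn p.1 (PySem.Str.lower (PySem.Str.strip line))) with
    | none => rfl
    | some p => rfl

-- main invariant: from (d, none, []) A's state machine equals B's cursor scan from i;
-- from (d, some k, c) it equals "finish the current segment, then continue"
lemma mainAB (lines : List String) : ∀ m i, lines.length ≤ i + m →
    (∀ d : PySem.Dict String String,
      finalizeA ((lines.drop i).foldl stepA (d, none, [])) = outerLoopB lines m i d) ∧
    (∀ (d : PySem.Dict String String) (k : String) (c : List String),
      finalizeA ((lines.drop i).foldl stepA (d, some k, c)) =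
        outerLoopB lines m (segLoopB lines lines.length i c).2
          (if (segLoopB lines lines.length i c).1 ≠ [] then
            d.insert k (PySem.Str.strip (PySem.Str.join "\n" (segLoopB lines lines.length i c).1))
          else d)) := by
  intro m
  induction m with
  | zero =>
    intro i h
    refine ⟨fun d => ?_, fun d k c => ?_⟩
    · rw [List.drop_eq_nil_of_le (by omega), outer_stop lines 0 i d (by omega)]
      rfl
    · rw [List.drop_eq_nil_of_le (by omega), seg_stop lines lines.length i c (by omega)]
      rw [outer_stop lines 0 i _ (by omega)]
      rfl
  | succ m ih =>
    intro i h
    by_cases hi : i < lines.length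
    · obtain ⟨ihP, ihQ⟩ := ih (i + 1) (by omega)
      refine ⟨fun d => ?_, fun d k c => ?_⟩
      · rw [List.drop_eq_getElem_cons hi, List.foldl_cons, stepA_eq]
        cases hk : headerKey lines[i] with
        | none =>
          rw [outerLoopB, dif_pos hi, hk]
          exact ihP d
        | some k' =>
          rw [outerLoopB, dif_pos hi, hk]
          exact ihQ d k' []
      · rw [List.drop_eq_getElem_cons hi, List.foldl_cons, stepA_eq]
        cases hk : headerKey lines[i] with
        | some k' =>
          rw [seg_header lines i c hi (by rw [hk]; exact Option.some_ne_none k')]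
          dsimp only
          rw [outerLoopB, dif_pos hi, hk]
          exact ihQ (finalizeA (d, some k, c)) k' []
        | none =>
          rw [seg_step lines i c hi hk]
          cases hkp : (PySem.Str.strip lines[i] != "") && !(PySem.Str.startswith (PySem.Str.strip lines[i]) "###") with
          | true =>
            simp only [if_true]
            have hge := seg_ge lines lines.length (i + 1) (c ++ [lines[i]])
            rw [outer_fuel lines (m + 1) m ((segLoopB lines lines.length (i + 1) (c ++ [lines[i]])).2)
                (if (segLoopB lines lines.length (i + 1) (c ++ [lines[i]])).1 ≠ [] then
                  d.insert k (PySem.Str.strip (PySem.Str.join "\n" (segLoopB lines lines.length (i + 1) (c ++ [lines[i]])).1))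
                else d) (by omega) (by omega)]
            exact ihQ d k (c ++ [lines[i]])
          | false =>
            simp only [Bool.false_eq_true, if_false]
            have hge := seg_ge lines lines.length (i + 1) c
            rw [outer_fuel lines (m + 1) m ((segLoopB lines lines.length (i + 1) c).2)
                (if (segLoopB lines lines.length (i + 1) c).1 ≠ [] then
                  d.insert k (PySem.Str.strip (PySem.Str.join "\n" (segLoopB lines lines.length (i + 1) c).1))
                else d) (by omega) (by omega)]
            exact ihQ d k c
    · refine ⟨fun d => ?_, fun d k c => ?_⟩
      · rw [List.drop_eq_nil_of_le (by omega), outer_stop lines (m + 1) i d (by omega)]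
        rfl
      · rw [List.drop_eq_nil_of_le (by omega), seg_stop lines lines.length i c (by omega)]
        rw [outer_stop lines (m + 1) i _ (by omega)]
        rfl

-- the placeholder-filling folds of A and B agree
lemma reqfold_eq (d : PySem.Dict String String) :
    requiredList.foldl (fun d req => if d.contains req = false then d.insert req "To be specified" else d) d
      = requiredList.foldl (fun d req => d.setdefault req "To be specified") d := by
  apply PySem.List.foldl_congr_mem
  intro acc x _
  cases hc : acc.contains x with
  | false => rw [if_pos rfl, PySem.Dict.setdefault_of_not_contains acc _ hc]
  | true => rw [if_neg (by simp), PySem.Dict.setdefault_of_contains acc _ hc]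

theorem parse_ports_eq (response : String) :
    parse_strategies_py response = parse_strategies_py_alt response := by
  unfold parse_strategies_py parse_strategies_py_alt
  have h := (mainAB ((PySem.Str.split? response "\n").getD [])
      ((PySem.Str.split? response "\n").getD []).length 0 (by omega)).1 PySem.Dict.empty
  rw [List.drop_zero] at h
  rw [h, reqfold_eq]

-- ===== VERDICT (by name: the statement is the Claim_ definition above) =====
theorem parse_strategies_py_spec : Claim_equal_parse_strategies_py := by
  intro response _
  unfold Spec_parse_strategies_py
  exact parse_ports_eq response
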